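-- pv_equiv track=rewrite | github.com/SylvainDe/aoc | python/2024/day5.py | get_full_ordering
-- ===== SOURCE A (Python) =====
-- import collections
--
-- def get_full_ordering(rules, update):
--     update = set(update)
--     order = collections.defaultdict(set)
--     for a, b in rules:
--         if a in update and b in update:
--             s = order[a]
--             objects_to_add = set([b])
--             while objects_to_add:
--                 b = objects_to_add.pop()
--                 if b not in s:
--                     s.add(b)
--                     objects_to_add.update(order[b])
--     for p, dep in order.items():
--         assert p not in dep
--     return order
-- ===== SOURCE B (Python) =====
-- import collections
--
-- def get_full_ordering(rules, update):
--     update = set(update)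
--     order = collections.defaultdict(set)
--
--     def add_reachable(s, node):
--         if node not in s:
--             s.add(node)
--             for nxt in order[node]:
--                 add_reachable(s, nxt)
--
--     for a, b in rules:
--         if a in update and b in update:
--             add_reachable(order[a], b)
--     for p, dep in order.items():
--         assert p not in dep
--     return order
-- ===== Notes on version B (the rewrite author's own statement) =====
-- stated objective: alternative
-- what changed: The inner 'while objects_to_add' worklist loop that pops one pending node at a time is replaced by a recursive depth-first helper add_reachable(s, node) that adds node and recurses into order[node], reading the live partially-built defaultdict at the same moments.
import Mathlib
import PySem

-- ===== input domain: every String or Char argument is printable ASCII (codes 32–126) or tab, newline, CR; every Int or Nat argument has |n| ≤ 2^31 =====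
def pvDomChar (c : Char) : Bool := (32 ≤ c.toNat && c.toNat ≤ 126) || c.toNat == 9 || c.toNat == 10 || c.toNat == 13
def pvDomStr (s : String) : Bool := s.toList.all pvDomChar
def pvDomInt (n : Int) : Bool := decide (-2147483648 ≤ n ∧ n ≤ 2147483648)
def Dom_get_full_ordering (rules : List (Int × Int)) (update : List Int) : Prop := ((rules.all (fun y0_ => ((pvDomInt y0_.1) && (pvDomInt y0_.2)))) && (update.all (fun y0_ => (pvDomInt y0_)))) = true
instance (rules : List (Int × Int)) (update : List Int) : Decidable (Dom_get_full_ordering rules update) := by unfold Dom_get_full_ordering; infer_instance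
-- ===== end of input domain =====

-- B replaces A's inner while-loop worklist closure by a recursive depth-first helper
-- add_reachable (objective: alternative decomposition, same output; return-value equivalence only —
-- the returned dict-of-sets is identical, set/dict iteration order is not modelled).

-- Shared defaultdict(set) helpers: access order[k] (creating the key with an empty set if
-- absent, as defaultdict does) and write back order[k] = v (overwrite keeps position).
def ddGet (d : List (Int × List Int)) (k : Int) : List (Int × List Int) × List Int :=
  match d.find? (fun p => p.1 == k) with
  | some p => (d, p.2)
  | none => (d ++ [(k, [])], [])

def ddSet (d : List (Int × List Int)) (k : Int) (v : List Int) : List (Int × List Int) :=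
  d.map (fun p => if p.1 == k then (k, v) else p)

-- ===== PORT A =====
-- A's inner 'while objects_to_add' loop.  objects_to_add is an internal Python set with
-- arbitrary pop order (the returned sets are order-insensitive); it is modelled as a work
-- list: pop = take the head, update = prepend order[b]'s elements.  Fuel only guards
-- termination; (|rules|+1)^2 exceeds the loop's possible iteration count.
def pyA_loop : Nat → List (Int × List Int) → List Int → List Int → List (Int × List Int) × List Int
  | _, d, s, [] => (d, s)
  | 0, d, s, _ :: _ => (d, s)
  | f + 1, d, s, b :: rest =>
    if b ∈ s then pyA_loop f d s rest
    else
      let s' := PySem.Set.add s b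
      let p := ddGet d b
      pyA_loop f p.1 s' (p.2 ++ rest)

def get_full_ordering (rules : List (Int × Int)) (update : List Int) : List (Int × List Int) :=
  let upd : PySem.Set Int := PySem.Set.ofList update
  let fuel := (rules.length + 1) * (rules.length + 1)
  -- the trailing 'assert p not in dep' raises exactly on inputs excluded by Pre_ and
  -- does not change the returned dict, so it is not re-checked here
  rules.foldl (fun d ab =>
    if PySem.Set.contains upd ab.1 && PySem.Set.contains upd ab.2 then
      let p := ddGet d ab.1
      let r := pyA_loop fuel p.1 p.2 [ab.2]
      ddSet r.1 ab.1 r.2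
    else d) []

-- ===== PORT B =====
-- B's recursive helper add_reachable(s, node), with the dict threaded explicitly and the
-- same fuel guard (one unit per call; the leftover fuel is returned so the recursion is
-- well-founded; 'min' only records that a call never returns more fuel than it received).
mutual
def altVisit : Nat → List (Int × List Int) → List Int → Int → (List (Int × List Int) × List Int) × Nat
  | 0, d, s, _ => ((d, s), 0)
  | f + 1, d, s, node =>
    if node ∈ s then ((d, s), f)
    else
      let s' := PySem.Set.add s node
      let p := ddGet d node
      altFold f p.1 s' p.2
termination_by f _ _ _ => (f, 0)

def altFold : Nat → List (Int × List Int) → List Int → List Int → (List (Int × List Int) × List Int) × Nat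
  | f, d, s, [] => ((d, s), f)
  | f, d, s, n :: ns =>
    let r := altVisit f d s n
    altFold (min r.2 f) r.1.1 r.1.2 ns
termination_by f _ _ ns => (f, ns.length + 1)
decreasing_by
  · exact Prod.Lex.right f (Nat.lt_succ_of_le (Nat.zero_le _))
  · rcases Nat.lt_or_ge (min r.2 f) f with h | h
    · exact Prod.Lex.left _ _ h
    · have : min r.2 f = f := Nat.le_antisymm (Nat.min_le_right _ _) h
      rw [this]; exact Prod.Lex.right f (Nat.lt_succ_self _)
end

def get_full_ordering_alt (rules : List (Int × Int)) (update : List Int) : List (Int × List Int) :=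
  let upd : PySem.Set Int := PySem.Set.ofList update
  let fuel := (rules.length + 1) * (rules.length + 1)
  rules.foldl (fun d ab =>
    if PySem.Set.contains upd ab.1 && PySem.Set.contains upd ab.2 then
      let p := ddGet d ab.1
      let r := altVisit fuel p.1 p.2 ab.2
      ddSet r.1.1 ab.1 r.1.2
    else d) []

-- ===== PRECONDITION & SPEC =====
-- A's final 'assert p not in dep' raises AssertionError exactly when the rule graph
-- restricted to pages of update contains a (directed) cycle; Pre_ states acyclicity
-- of that graph (B raises on exactly the same inputs).
def pvEdges (rules : List (Int × Int)) (update : List Int) : List (Int × Int) :=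
  let upd : PySem.Set Int := PySem.Set.ofList update
  rules.filter (fun ab => PySem.Set.contains upd ab.1 && PySem.Set.contains upd ab.2)

def pvGrow (es : List (Int × Int)) (s : List Int) : List Int :=
  PySem.Set.update s ((es.filter (fun e => decide (e.1 ∈ s))).map (·.2))

def pvReach (es : List (Int × Int)) (x : Int) : List Int :=
  (pvGrow es)^[es.length] (PySem.Set.ofList ((es.filter (fun e => e.1 == x)).map (·.2)))

def Pre_get_full_ordering (rules : List (Int × Int)) (update : List Int) : Prop :=
  ∀ e ∈ pvEdges rules update, e.1 ∉ pvReach (pvEdges rules update) e.1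

instance (rules : List (Int × Int)) (update : List Int) : Decidable (Pre_get_full_ordering rules update) := by
  unfold Pre_get_full_ordering; infer_instance

def pvWitness_get_full_ordering : (List (Int × Int)) × List Int := ([(1, 2), (2, 3), (1, 3)], [1, 2, 3])

def Spec_get_full_ordering (rules : List (Int × Int)) (update : List Int) (out : List (Int × List Int)) : Prop := out = get_full_ordering_alt rules update
instance (rules : List (Int × Int)) (update : List Int) (out : List (Int × List Int)) : Decidable (Spec_get_full_ordering rules update out) := by unfold Spec_get_full_ordering; infer_instance

-- ===== CLAIM (what is proved, stated in full; the proofs are below) =====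
def Claim_equal_get_full_ordering : Prop := ∀ (rules : List (Int × Int)) (update : List Int), Dom_get_full_ordering rules update → Pre_get_full_ordering rules update → Spec_get_full_ordering rules update (get_full_ordering rules update)

-- ===== LEMMAS AND PROOFS =====

-- a call never returns more fuel than it received
theorem altFold_snd_le_aux (ns : List Int) : ∀ (f : Nat) (d : List (Int × List Int)) (s : List Int),
    (∀ g ≤ f, ∀ (d' : List (Int × List Int)) (s' : List Int) (n : Int), (altVisit g d' s' n).2 ≤ g) →
    (altFold f d s ns).2 ≤ f := by
  induction ns with
  | nil => intro f d s _; simp [altFold]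
  | cons n ns ih =>
    intro f d s hv
    rw [altFold]
    exact le_trans
      (ih _ _ _ (fun g hg => hv g (le_trans hg (Nat.min_le_right _ _))))
      (Nat.min_le_right _ _)

theorem altVisit_snd_le : ∀ (f : Nat) (d : List (Int × List Int)) (s : List Int) (n : Int),
    (altVisit f d s n).2 ≤ f := by
  intro f
  induction f using Nat.strong_induction_on with
  | _ f ih =>
    intro d s n
    match f with
    | 0 => simp [altVisit]
    | g + 1 =>
      rw [altVisit]
      split
      · exact Nat.le_succ g
      · exact le_trans
          (altFold_snd_le_aux _ g _ _
            (fun g' hg' d' s' n' => ih g' (Nat.lt_succ_of_le hg') d' s' n'))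
          (Nat.le_succ g)

theorem altFold_cons (f : Nat) (d : List (Int × List Int)) (s : List Int) (n : Int) (ns : List Int) :
    altFold f d s (n :: ns) = altFold (altVisit f d s n).2 (altVisit f d s n).1.1 (altVisit f d s n).1.2 ns := by
  rw [altFold, Nat.min_eq_left (altVisit_snd_le f d s n)]

theorem altFold_append (xs ys : List Int) (f : Nat) (d : List (Int × List Int)) (s : List Int) :
    altFold f d s (xs ++ ys) =
      altFold (altFold f d s xs).2 (altFold f d s xs).1.1 (altFold f d s xs).1.2 ys := by
  induction xs generalizing f d s with
  | nil => simp [altFold]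
  | cons n xs ih => rw [List.cons_append, altFold_cons, altFold_cons, ih]

theorem altFold_zero (ns : List Int) (d : List (Int × List Int)) (s : List Int) :
    altFold 0 d s ns = ((d, s), 0) := by
  induction ns with
  | nil => simp [altFold]
  | cons n ns ih => rw [altFold]; simp [altVisit, ih]

theorem pyA_loop_zero (d : List (Int × List Int)) (s : List Int) (ys : List Int) :
    pyA_loop 0 d s ys = (d, s) := by
  cases ys <;> rfl

-- the explicit-stack loop of A simulates the recursive descent of B
theorem loop_eq_fold : ∀ (f : Nat) (xs ys : List Int) (d : List (Int × List Int)) (s : List Int),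
    pyA_loop f d s (xs ++ ys) =
      pyA_loop (altFold f d s xs).2 (altFold f d s xs).1.1 (altFold f d s xs).1.2 ys := by
  intro f
  induction f using Nat.strong_induction_on with
  | _ f ih =>
    intro xs ys d s
    match xs with
    | [] => simp [altFold]
    | b :: xs =>
      match f with
      | 0 =>
        simp only [List.cons_append, altFold_zero, pyA_loop_zero]
      | g + 1 =>
        rw [List.cons_append, altFold_cons]
        by_cases hb : b ∈ s
        · rw [pyA_loop, if_pos hb, altVisit, if_pos hb]
          exact ih g (Nat.lt_succ_self g) xs ys d s
        · rw [pyA_loop, if_neg hb, altVisit, if_neg hb]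
          dsimp only
          rw [← List.append_assoc, ih g (Nat.lt_succ_self g) _ ys _ _, altFold_append]

theorem loop_eq_visit (f : Nat) (d : List (Int × List Int)) (s : List Int) (b : Int) :
    pyA_loop f d s [b] = (altVisit f d s b).1 := by
  have h := loop_eq_fold f [b] [] d s
  rw [List.append_nil] at h
  rw [h, altFold_cons]
  simp [altFold, pyA_loop]

-- ===== VERDICT (by name: the statement is the Claim_ definition above) =====
theorem get_full_ordering_spec : Claim_equal_get_full_ordering := by
  intro rules update _ _
  unfold Spec_get_full_ordering get_full_ordering get_full_ordering_alt
  have hbody :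
      (fun (d : List (Int × List Int)) (ab : Int × Int) =>
        if PySem.Set.contains (PySem.Set.ofList update) ab.1 && PySem.Set.contains (PySem.Set.ofList update) ab.2 then
          let p := ddGet d ab.1
          let r := pyA_loop ((rules.length + 1) * (rules.length + 1)) p.1 p.2 [ab.2]
          ddSet r.1 ab.1 r.2
        else d) =
      (fun (d : List (Int × List Int)) (ab : Int × Int) =>
        if PySem.Set.contains (PySem.Set.ofList update) ab.1 && PySem.Set.contains (PySem.Set.ofList update) ab.2 then
          let p := ddGet d ab.1
          let r := altVisit ((rules.length + 1) * (rules.length + 1)) p.1 p.2 ab.2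
          ddSet r.1.1 ab.1 r.1.2
        else d) := by
    funext d ab
    simp only [loop_eq_visit]
  simp only [hbody]
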